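-- pv_equiv track=rewrite | github.com/sirlyun/SirlyunAlgo | 프로그래머스/2/49993. 스킬트리/스킬트리.py | solution
-- ===== SOURCE A (Python) =====
-- def solution(skill, skill_trees):
--     answer = 0
--
--     for trees in skill_trees:
--         tmp_skill = skill
--         cnt = 0
--         for t in trees:
--             if t not in tmp_skill:
--                 continue
--
--             if tmp_skill[cnt] != t:
--                 break
--
--             cnt += 1
--         else:
--              answer += 1
--
--     return answer
-- ===== SOURCE B (Python) =====
-- def solution(skill, skill_trees):
--     answer = 0
--     for tree in skill_trees:
--         learned = ''.join(c for c in tree if c in skill)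
--         if skill.startswith(learned):
--             answer += 1
--     return answer
-- ===== Notes on version B (the rewrite author's own statement) =====
-- stated objective: simpler
-- what changed: A's single interleaved pass that skips non-skill chars while index-matching against skill is replaced by a two-phase build-then-compare: per tree B first builds the subsequence of in-skill characters and then counts the tree iff that subsequence is a prefix of skill (one startswith), removing the running index and the break/for-else control flow.
-- outside the precondition, e.g. on solution('A', ['AA']): A raises IndexError, B returns 0
-- crash fix: When some tree's in-skill subsequence has skill as a strict prefix (duplicate skill chars beyond a fully learned skill), A raises IndexError on tmp_skill[cnt]; B returns the count treating such trees as non-matching. — e.g. on solution("A", ["AA"]): A raises IndexError, B returns 0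
import Mathlib
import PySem

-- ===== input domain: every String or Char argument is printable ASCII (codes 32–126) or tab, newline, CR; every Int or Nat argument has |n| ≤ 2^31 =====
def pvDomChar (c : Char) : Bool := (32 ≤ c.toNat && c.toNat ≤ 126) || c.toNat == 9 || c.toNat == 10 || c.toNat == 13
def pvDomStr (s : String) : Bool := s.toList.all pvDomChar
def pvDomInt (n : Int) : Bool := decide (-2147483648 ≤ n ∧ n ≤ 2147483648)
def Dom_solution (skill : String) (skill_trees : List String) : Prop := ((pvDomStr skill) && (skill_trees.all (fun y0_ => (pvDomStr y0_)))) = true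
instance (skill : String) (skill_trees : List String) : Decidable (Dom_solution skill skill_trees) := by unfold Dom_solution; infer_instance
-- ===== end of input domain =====

-- B is a two-phase build-then-compare rewrite: per tree it first builds the subsequence of in-skill
-- characters, then counts the tree iff that subsequence is a prefix of skill (objective: simpler).

-- ===== PORT A =====
-- inner for-loop over the tree's characters with the running index cnt;
-- returns none where Python's tmp_skill[cnt] raises IndexError, some true for the for-else case,
-- some false when the loop breaks.
def solInnerA (skill : String) : List Char → Int → Option Bool
  | [], _ => some true
  | t :: rest, cnt =>
    if t ∈ skill.toList then
      match PySem.Str.pyGet? skill cnt with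
      | none => none
      | some c => if c ≠ t then some false else solInnerA skill rest (cnt + 1)
    else
      solInnerA skill rest cnt

def solution (skill : String) (skill_trees : List String) : Int :=
  skill_trees.foldl
    (fun answer trees =>
      match solInnerA skill trees.toList 0 with
      | some true => answer + 1
      | _ => answer)   -- 'none' is the IndexError case, excluded by Pre_solution
    0

-- ===== PORT B =====
def solLearned (skill : String) (tree : String) : List Char :=
  tree.toList.filter (fun c => c ∈ skill.toList)

def solution_alt (skill : String) (skill_trees : List String) : Int :=
  skill_trees.foldl
    (fun answer tree =>
      if (solLearned skill tree).isPrefixOf skill.toList then answer + 1 else answer)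
    0

-- ===== PRECONDITION & SPEC =====
-- Pre_ excludes exactly the inputs where A raises IndexError: some tree whose in-skill
-- subsequence has skill as a strict prefix (tmp_skill[cnt] is indexed past the end).
def Pre_solution (skill : String) (skill_trees : List String) : Prop :=
  ∀ tree ∈ skill_trees,
    ¬ (skill.toList.isPrefixOf (solLearned skill tree) ∧
       skill.toList.length < (solLearned skill tree).length)
instance (skill : String) (skill_trees : List String) : Decidable (Pre_solution skill skill_trees) := by
  unfold Pre_solution; infer_instance

def pvWitness_solution : String × List String := ("CBD", ["BACDE", "CBADF", "AECB", "BDA", "CBD"])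

-- On inputs where some tree's in-skill subsequence strictly extends skill, A raises IndexError;
-- B returns the count treating such trees as non-matching.
def Raises_solution (skill : String) (skill_trees : List String) : Prop :=
  ∃ tree ∈ skill_trees,
    skill.toList.isPrefixOf (solLearned skill tree) ∧
    skill.toList.length < (solLearned skill tree).length
instance (skill : String) (skill_trees : List String) : Decidable (Raises_solution skill skill_trees) := by
  unfold Raises_solution; infer_instance
def pvRaiseWitness_solution : String × List String := ("A", ["AA"])
def pvRaiseWitnessOut_solution : Int := 0

def Spec_solution (skill : String) (skill_trees : List String) (out : Int) : Prop := out = solution_alt skill skill_trees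
instance (skill : String) (skill_trees : List String) (out : Int) : Decidable (Spec_solution skill skill_trees out) := by unfold Spec_solution; infer_instance

-- ===== CLAIM (what is proved, stated in full; the proofs are below) =====
def Claim_equal_solution : Prop := ∀ (skill : String) (skill_trees : List String), Dom_solution skill skill_trees → Pre_solution skill skill_trees → Spec_solution skill skill_trees (solution skill skill_trees)
def Claim_raises_solution : Prop := (∀ (skill : String) (skill_trees : List String), Dom_solution skill skill_trees → Raises_solution skill skill_trees → ¬ Pre_solution skill skill_trees) ∧ (Dom_solution (pvRaiseWitness_solution.1) (pvRaiseWitness_solution.2) ∧ Raises_solution (pvRaiseWitness_solution.1) (pvRaiseWitness_solution.2) ∧ solution_alt (pvRaiseWitness_solution.1) (pvRaiseWitness_solution.2) = pvRaiseWitnessOut_solution)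

-- ===== LEMMAS AND PROOFS =====

-- A's inner loop, characterised by comparing the filtered subsequence against the rest of skill.
lemma solInnerA_eq (skill : String) (l : List Char) (n : Nat) :
    solInnerA skill l (n : Int) =
      (if (l.filter (fun c => c ∈ skill.toList)).isPrefixOf (skill.toList.drop n) then some true
       else if (skill.toList.drop n).isPrefixOf (l.filter (fun c => c ∈ skill.toList)) then none
       else some false) := by
  induction l generalizing n with
  | nil => simp [solInnerA]
  | cons t rest ih =>
    by_cases ht : t ∈ skill.toList
    · have hget : PySem.Str.pyGet? skill (n : Int) = (skill.toList.drop n).head? := by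
        simp only [PySem.Str.pyGet?, PySem.Chars.pyGet?, PySem.List.pyGet?, PySem.List.pyIdx?,
              List.head?_drop]
        split <;> rename_i hlt
        · split <;> rename_i h2
          · simp
          · rw [eq_comm]
            simp only [Option.bind_none, List.getElem?_eq_none_iff]
            omega
        · exact absurd (by positivity) hlt
      cases hd : skill.toList.drop n with
      | nil =>
        simp only [solInnerA, if_pos ht, hget, hd]
        simp [ht]
      | cons c s' =>
        have hd' : skill.toList.drop (n + 1) = s' := by
          rw [← List.drop_drop]
          simp [hd]
        by_cases hc : c = t
        · subst hc
          simp only [solInnerA, if_pos ht, hget, hd, List.head?_cons]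
          have := ih (n + 1)
          push_cast at this
          simp only [ne_eq, not_true_eq_false, if_false, this, hd']
          simp [ht]
        · simp only [solInnerA, if_pos ht, hget, hd, List.head?_cons]
          simp [ht, List.isPrefixOf, hc, Ne.symm hc]
    · simp only [solInnerA, if_neg ht]
      rw [ih n]
      simp [ht]

-- strict-prefix trichotomy used to turn 'not a strict extension' into 'some true ↔ prefix'.
lemma solInnerA_of_pre (skill : String) (tree : String)
    (h : ¬ (skill.toList.isPrefixOf (solLearned skill tree) ∧
            skill.toList.length < (solLearned skill tree).length)) :
    solInnerA skill tree.toList 0 =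
      some ((solLearned skill tree).isPrefixOf skill.toList) := by
  have h0 := solInnerA_eq skill tree.toList 0
  norm_num at h0
  rw [h0]
  unfold solLearned at *
  set f := tree.toList.filter (fun c => c ∈ skill.toList) with hf
  by_cases hp : f.isPrefixOf skill.toList
  · simp [hp, List.isPrefixOf_iff_prefix.mp hp]
  · have hnp : ¬ skill.toList.isPrefixOf f := by
      intro hsp
      rcases Nat.lt_or_ge skill.toList.length f.length with hlt | hge
      · exact h ⟨hsp, hlt⟩
      · have heq : skill.toList = f := List.IsPrefix.eq_of_length_le
          (List.isPrefixOf_iff_prefix.mp hsp) hge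
        rw [List.isPrefixOf_iff_prefix, ← heq] at hp
        exact hp List.prefix_rfl
    have hp' : ¬ f <+: skill.toList := fun hx => hp (List.isPrefixOf_iff_prefix.mpr hx)
    have hnp' : ¬ skill.toList <+: f := fun hx => hnp (List.isPrefixOf_iff_prefix.mpr hx)
    simp [hp', hnp', Bool.eq_false_iff, List.isPrefixOf_iff_prefix]

lemma solution_foldl_eq (skill : String) (trees : List String)
    (h : ∀ tree ∈ trees,
      ¬ (skill.toList.isPrefixOf (solLearned skill tree) ∧
         skill.toList.length < (solLearned skill tree).length)) (acc : Int) :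
    trees.foldl
      (fun answer t =>
        match solInnerA skill t.toList 0 with
        | some true => answer + 1
        | _ => answer) acc =
    trees.foldl
      (fun answer t =>
        if (solLearned skill t).isPrefixOf skill.toList then answer + 1 else answer) acc := by
  induction trees generalizing acc with
  | nil => rfl
  | cons t rest ih =>
    have ht := solInnerA_of_pre skill t (h t (by simp))
    simp only [List.foldl_cons, ht]
    rw [ih (fun tr htr => h tr (by simp [htr]))]
    by_cases hp : (solLearned skill t).isPrefixOf skill.toList <;> simp [hp]

-- ===== VERDICT (by name: the statement is the Claim_ definition above) =====
theorem solution_spec : Claim_equal_solution := by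
  intro skill skill_trees _ hpre
  unfold Spec_solution solution solution_alt
  exact solution_foldl_eq skill skill_trees hpre 0

def solution_raises : Claim_raises_solution := by
  unfold Claim_raises_solution
  refine ⟨?_, by decide⟩
  intro skill skill_trees _ hr hpre
  rcases hr with ⟨tree, htree, hcond⟩
  exact hpre tree htree hcond
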